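-- pv_equiv track=rewrite | github.com/Avengala/L1 | tpNote.py | maximini
-- ===== SOURCE A (Python) =====
-- def maximini(dico):
--     max = 0
--     res, resmin = (), ()
--     for x in dico:
--         if dico[x] >= max:
--             max = dico[x]
--             res = (x,)
--     min = max
--     for y in dico:
--         if dico[y] <= min:
--             min = dico[y]
--             resmin = (y,)
--     res += resmin
--     return res
-- ===== SOURCE B (Python) =====
-- def maximini(dico):
--     # single pass: fuse A's two loops; maintain running max (seeded at 0,
--     # '>=' so the last tie wins) and running min (None sentinel, '<=').
--     mx, res = 0, ()
--     mn, resmin = None, ()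
--     for k, v in dico.items():
--         if v >= mx:
--             mx = v
--             res = (k,)
--         if mn is None or v <= mn:
--             mn = v
--             resmin = (k,)
--     return res + resmin
-- ===== Notes on version B (the rewrite author's own statement) =====
-- stated objective: alternative
-- what changed: Fuses A's two sequential dict passes (the second seeded with the first pass's final max) into one pass that tracks the max (seeded at 0) and the min (None sentinel) simultaneously; equivalent because A's final max bounds every value from above, so the min scan's seeding is irrelevant.
import Mathlib
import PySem

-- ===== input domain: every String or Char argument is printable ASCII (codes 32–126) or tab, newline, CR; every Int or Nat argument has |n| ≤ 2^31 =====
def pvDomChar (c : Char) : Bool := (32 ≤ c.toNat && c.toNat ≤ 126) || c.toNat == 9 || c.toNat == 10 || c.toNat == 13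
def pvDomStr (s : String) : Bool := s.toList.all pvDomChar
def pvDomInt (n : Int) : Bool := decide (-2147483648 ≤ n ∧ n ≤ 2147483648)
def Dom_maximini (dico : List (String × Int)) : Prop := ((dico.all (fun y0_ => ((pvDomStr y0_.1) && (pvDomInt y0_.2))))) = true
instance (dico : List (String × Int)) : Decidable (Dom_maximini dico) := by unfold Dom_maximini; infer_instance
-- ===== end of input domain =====

-- B fuses A's two passes over the dict into one pass that tracks max and min at once;
-- equivalence of the RETURN value is proved for association lists with distinct keys.

-- ===== PORT A =====
-- two passes; dico[x] is the dict lookup, ported as first-match getD (x is always a key, so exact)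
def maximini (dico : List (String × Int)) : List String :=
  let d := PySem.Dict.mk dico
  let s1 := dico.foldl
    (fun (s : Int × List String) p =>
      if s.1 ≤ d.getD p.1 0 then (d.getD p.1 0, [p.1]) else s) ((0 : Int), ([] : List String))
  let s2 := dico.foldl
    (fun (s : Int × List String) p =>
      if d.getD p.1 0 ≤ s.1 then (d.getD p.1 0, [p.1]) else s) (s1.1, ([] : List String))
  s1.2 ++ s2.2

-- ===== PORT B =====
-- one pass over the items; max seeded at 0 (>=, last tie wins), min via a None sentinel (<=)
def maximini_alt (dico : List (String × Int)) : List String :=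
  let st := dico.foldl
    (fun (s : (Int × List String) × (Option Int × List String)) p =>
      (if s.1.1 ≤ p.2 then (p.2, [p.1]) else s.1,
       match s.2.1 with
       | none => (some p.2, [p.1])
       | some m => if p.2 ≤ m then (some p.2, [p.1]) else s.2))
    (((0 : Int), ([] : List String)), ((none : Option Int), ([] : List String)))
  st.1.2 ++ st.2.2

-- ===== PRECONDITION & SPEC =====
-- Pre_: the argument stands for a Python dict, which cannot hold duplicate keys; association
-- lists with a repeated key correspond to no dict input, so they are excluded.
def Pre_maximini (dico : List (String × Int)) : Prop := (dico.map Prod.fst).Nodup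
instance (dico : List (String × Int)) : Decidable (Pre_maximini dico) := by unfold Pre_maximini; infer_instance
def pvWitness_maximini : (List (String × Int)) := [("a", 3), ("b", -1), ("c", 3)]

def Spec_maximini (dico : List (String × Int)) (out : List String) : Prop := out = maximini_alt dico
instance (dico : List (String × Int)) (out : List String) : Decidable (Spec_maximini dico out) := by unfold Spec_maximini; infer_instance

-- ===== CLAIM (what is proved, stated in full; the proofs are below) =====
def Claim_equal_maximini : Prop := ∀ (dico : List (String × Int)), Dom_maximini dico → Pre_maximini dico → Spec_maximini dico (maximini dico)

-- ===== LEMMAS AND PROOFS =====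

-- the pure (lookup-free) step functions
def stepMax (s : Int × List String) (p : String × Int) : Int × List String :=
  if s.1 ≤ p.2 then (p.2, [p.1]) else s

def stepMin (s : Int × List String) (p : String × Int) : Int × List String :=
  if p.2 ≤ s.1 then (p.2, [p.1]) else s

def stepMinO (s : Option Int × List String) (p : String × Int) : Option Int × List String :=
  match s.1 with
  | none => (some p.2, [p.1])
  | some m => if p.2 ≤ m then (some p.2, [p.1]) else s

-- with nodup keys the lookup of a pair's key returns that pair's value
theorem lookup_eq_val (dico : List (String × Int)) (h : (dico.map Prod.fst).Nodup)
    (p : String × Int) (hp : p ∈ dico) : (PySem.Dict.mk dico).getD p.1 0 = p.2 := by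
  apply PySem.Dict.getD_of_mem_items (k := p.1) (v := p.2)
  · exact hp
  · simpa [PySem.Dict.keys] using h

-- A's two loops with the lookups replaced by the pairs' own values
theorem maximini_pure (dico : List (String × Int)) (h : (dico.map Prod.fst).Nodup) :
    maximini dico =
      (dico.foldl stepMax ((0 : Int), ([] : List String))).2 ++
      (dico.foldl stepMin ((dico.foldl stepMax ((0 : Int), ([] : List String))).1,
        ([] : List String))).2 := by
  unfold maximini
  have h1 : dico.foldl
      (fun (s : Int × List String) p =>
        if s.1 ≤ (PySem.Dict.mk dico).getD p.1 0 then ((PySem.Dict.mk dico).getD p.1 0, [p.1]) else s)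
      ((0 : Int), ([] : List String)) = dico.foldl stepMax ((0 : Int), ([] : List String)) := by
    apply PySem.List.foldl_congr_mem
    intro acc x hx
    simp [stepMax, lookup_eq_val dico h x hx]
  have h2 : ∀ (m : Int), dico.foldl
      (fun (s : Int × List String) p =>
        if (PySem.Dict.mk dico).getD p.1 0 ≤ s.1 then ((PySem.Dict.mk dico).getD p.1 0, [p.1]) else s)
      (m, ([] : List String)) = dico.foldl stepMin (m, ([] : List String)) := by
    intro m
    apply PySem.List.foldl_congr_mem
    intro acc x hx
    simp [stepMin, lookup_eq_val dico h x hx]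
  simp only [h1, h2]

-- B's fused fold is the pair of the max fold and the optional-min fold
theorem alt_split (dico : List (String × Int))
    (a : Int × List String) (b : Option Int × List String) :
    dico.foldl
      (fun (s : (Int × List String) × (Option Int × List String)) p =>
        (if s.1.1 ≤ p.2 then (p.2, [p.1]) else s.1,
         match s.2.1 with
         | none => (some p.2, [p.1])
         | some m => if p.2 ≤ m then (some p.2, [p.1]) else s.2))
      (a, b) = (dico.foldl stepMax a, dico.foldl stepMinO b) := by
  induction dico generalizing a b with
  | nil => rfl
  | cons p t ih => simp [List.foldl, stepMax, stepMinO, ih]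

-- the max fold's first component never decreases
theorem stepMax_mono (dico : List (String × Int)) (s : Int × List String) :
    s.1 ≤ (dico.foldl stepMax s).1 := by
  induction dico generalizing s with
  | nil => exact le_refl _
  | cons p t ih =>
    simp only [List.foldl]
    refine le_trans ?_ (ih (stepMax s p))
    unfold stepMax
    split <;> simp_all

-- once both min folds are seeded, they run in lockstep
theorem min_lockstep (t : List (String × Int)) (m : Int) (r : List String) :
    t.foldl stepMin (m, r) = (fun s => ((s.1).getD 0, s.2)) (t.foldl stepMinO (some m, r)) := by
  induction t generalizing m r with
  | nil => rfl
  | cons p t ih =>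
    simp only [List.foldl, stepMin, stepMinO]
    split <;> simp [ih]

-- A's min fold seeded with A's final max equals B's sentinel min fold
theorem min_eq (dico : List (String × Int)) :
    (dico.foldl stepMin ((dico.foldl stepMax ((0 : Int), ([] : List String))).1,
        ([] : List String))).2 =
    (dico.foldl stepMinO ((none : Option Int), ([] : List String))).2 := by
  cases dico with
  | nil => rfl
  | cons p t =>
    simp only [List.foldl]
    have hmx : p.2 ≤ (t.foldl stepMax (stepMax ((0 : Int), ([] : List String)) p)).1 := by
      by_cases h0 : (0 : Int) ≤ p.2
      · rw [show stepMax ((0 : Int), ([] : List String)) p = (p.2, [p.1]) by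
          simp [stepMax, h0]]
        simpa using stepMax_mono t (p.2, [p.1])
      · rw [show stepMax ((0 : Int), ([] : List String)) p = ((0 : Int), ([] : List String)) by
          simp [stepMax, h0]]
        have := stepMax_mono t ((0 : Int), ([] : List String))
        simp at this
        omega
    rw [show stepMin ((t.foldl stepMax (stepMax ((0 : Int), ([] : List String)) p)).1,
          ([] : List String)) p = (p.2, [p.1]) by simp [stepMin, hmx],
        show stepMinO ((none : Option Int), ([] : List String)) p = (some p.2, [p.1]) from rfl]
    rw [min_lockstep]

-- ===== VERDICT (by name: the statement is the Claim_ definition above) =====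
theorem maximini_spec : Claim_equal_maximini := by
  intro dico _ hpre
  unfold Spec_maximini maximini_alt
  rw [maximini_pure dico hpre, alt_split, min_eq]
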